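-- pv_equiv track=rewrite | github.com/NoaSpele/Advent-of-Code | 2023/dec13_v2.py | findSymmetry
-- ===== SOURCE A (Python) =====
-- def findSymmetry(g):
--     a1, a2 = 0, 0
--     for r, (r1, r2) in enumerate(zip(g[:-1], g[1:])):
--         r1, r2, diff = r, r+1, 0
--         while r1 >= 0 and r2 < len(g):
--             diff += len([x for x,y in zip(g[r1], g[r2]) if x != y])
--             r1, r2 = r1 - 1, r2 + 1
--         if diff == 0: a1 = r+1
--         if diff == 1: a2 = r+1
--     return a1, a2
-- ===== SOURCE B (Python) =====
-- def _rowdiff(s, t):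
--     return len([x for x, y in zip(s, t) if x != y])
--
--
-- def findSymmetry(g):
--     n = len(g)
--     d = [[_rowdiff(gi, g[j]) for j in range(i + 1, n, 2)] for i, gi in enumerate(g)]
--     diffs = [sum(d[r - k][k] for k in range(min(r + 1, n - 1 - r))) for r in range(n - 1)]
--     a1 = next((r + 1 for r in reversed(range(n - 1)) if diffs[r] == 0), 0)
--     a2 = next((r + 1 for r in reversed(range(n - 1)) if diffs[r] == 1), 0)
--     return (a1, a2)
-- ===== Notes on version B (the rewrite author's own statement) =====
-- stated objective: alternative
-- what changed: Replaces A's forward split loop with overwritten accumulators and per-split column rescans by a precomputed odd-gap row-difference table, one memoised per-split difference list, and a backward first-match scan for each answer.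
import Mathlib
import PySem

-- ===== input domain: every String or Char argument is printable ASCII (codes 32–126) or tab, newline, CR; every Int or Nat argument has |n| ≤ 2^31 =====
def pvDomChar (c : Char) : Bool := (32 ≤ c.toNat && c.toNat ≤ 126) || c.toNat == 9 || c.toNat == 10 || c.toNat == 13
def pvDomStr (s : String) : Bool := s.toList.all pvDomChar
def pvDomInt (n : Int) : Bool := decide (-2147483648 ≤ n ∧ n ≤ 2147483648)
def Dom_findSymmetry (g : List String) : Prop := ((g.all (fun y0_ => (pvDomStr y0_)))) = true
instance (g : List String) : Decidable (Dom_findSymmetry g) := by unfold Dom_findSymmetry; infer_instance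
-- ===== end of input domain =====

-- B replaces A's forward loop with overwritten accumulators and per-split column rescans by a
-- precomputed odd-gap row-difference table, one memoised difference list, and a backward
-- first-match scan per answer (objective: alternative structure, same asymptotic cost).

-- ===== PORT A =====

-- len([x for x,y in zip(r1, r2) if x != y])
def rowDiffA (s t : String) : Int :=
  (((s.toList.zip t.toList).filter (fun p => decide (p.1 ≠ p.2))).length : Int)

-- the inner 'while r1 >= 0 and r2 < len(g)' loop of A
def whileA (g : List String) (r1 r2 diff : Int) : Int :=
  if 0 ≤ r1 ∧ r2 < (g.length : Int) then
    whileA g (r1 - 1) (r2 + 1)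
      (diff + rowDiffA (PySem.List.pyGetD g r1 "") (PySem.List.pyGetD g r2 ""))
  else diff
termination_by (r1 + 1).toNat
decreasing_by omega

def findSymmetry (g : List String) : Int × Int :=
  (PySem.List.pyRange 0 ((g.length : Int) - 1) 1).foldl
    (fun (a : Int × Int) r =>
      let diff := whileA g r (r + 1) 0
      (if diff = 0 then r + 1 else a.1, if diff = 1 then r + 1 else a.2))
    (0, 0)

-- ===== PORT B =====

-- _rowdiff(s, t) = len([x for x, y in zip(s, t) if x != y])
def rowDiffB (s t : String) : Int :=
  (((s.toList.zip t.toList).filter (fun p => decide (p.1 ≠ p.2))).length : Int)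

def findSymmetry_alt (g : List String) : Int × Int :=
  let n : Int := g.length
  let d : List (List Int) := (PySem.List.enumerate g).map (fun p =>
    (PySem.List.pyRange (p.1 + 1) n 2).map (fun j => rowDiffB p.2 (PySem.List.pyGetD g j "")))
  let diffs : List Int := (PySem.List.pyRange 0 (n - 1) 1).map (fun r =>
    ((PySem.List.pyRange 0 (min (r + 1) (n - 1 - r)) 1).map (fun k =>
      PySem.List.pyGetD (PySem.List.pyGetD d (r - k) []) k 0)).sum)
  let a1 := (((PySem.List.pyRange 0 (n - 1) 1).reverse.find?
                (fun r => PySem.List.pyGetD diffs r 0 == 0)).map (· + 1)).getD 0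
  let a2 := (((PySem.List.pyRange 0 (n - 1) 1).reverse.find?
                (fun r => PySem.List.pyGetD diffs r 0 == 1)).map (· + 1)).getD 0
  (a1, a2)

-- ===== PRECONDITION & SPEC =====
def Spec_findSymmetry (g : List String) (out : Int × Int) : Prop := out = findSymmetry_alt g
instance (g : List String) (out : Int × Int) : Decidable (Spec_findSymmetry g out) := by unfold Spec_findSymmetry; infer_instance

-- ===== CLAIM (what is proved, stated in full; the proofs are below) =====
def Claim_equal_findSymmetry : Prop := ∀ (g : List String), Dom_findSymmetry g → Spec_findSymmetry g (findSymmetry g)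

-- ===== LEMMAS AND PROOFS =====

-- A's while loop as a sum over List.range
theorem whileA_sum (g : List String) :
    ∀ (c : ℕ) (r1 r2 diff : Int), (min (r1 + 1) ((g.length : Int) - r2)).toNat = c →
      whileA g r1 r2 diff =
        diff + ((List.range c).map (fun (k : ℕ) =>
          rowDiffA (PySem.List.pyGetD g (r1 - (k : Int)) "")
                   (PySem.List.pyGetD g (r2 + (k : Int)) ""))).sum := by
  intro c
  induction c with
  | zero =>
    intro r1 r2 diff hmin
    rw [whileA, if_neg (by omega)]
    simp
  | succ c ih =>
    intro r1 r2 diff hmin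
    rw [whileA, if_pos (by omega)]
    rw [ih (r1 - 1) (r2 + 1) _ (by omega)]
    rw [List.range_succ_eq_map, List.map_cons, List.map_map, List.sum_cons]
    have hmap : List.map ((fun (k : ℕ) =>
          rowDiffA (PySem.List.pyGetD g (r1 - (k : Int)) "")
                   (PySem.List.pyGetD g (r2 + (k : Int)) "")) ∘ Nat.succ) (List.range c)
        = List.map (fun (k : ℕ) =>
          rowDiffA (PySem.List.pyGetD g (r1 - 1 - (k : Int)) "")
                   (PySem.List.pyGetD g (r2 + 1 + (k : Int)) "")) (List.range c) := by
      refine List.map_congr_left ?_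
      intro k _
      simp only [Function.comp_apply, Nat.succ_eq_add_one]
      have h1 : r1 - ((k + 1 : ℕ) : Int) = r1 - 1 - (k : Int) := by push_cast; ring
      have h2 : r2 + ((k + 1 : ℕ) : Int) = r2 + 1 + (k : Int) := by push_cast; ring
      rw [h1, h2]
    rw [hmap]
    simp only [Nat.cast_zero, sub_zero, add_zero]
    ring

-- B's per-split table-lookup sum equals the same sum over List.range
theorem splitDiff_eq (g : List String) (r : Int) (h0 : 0 ≤ r)
    (h1 : r < (g.length : Int) - 1) :
    ((PySem.List.pyRange 0 (min (r + 1) ((g.length : Int) - 1 - r)) 1).map (fun k =>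
      PySem.List.pyGetD (PySem.List.pyGetD
        ((PySem.List.enumerate g).map (fun p =>
          (PySem.List.pyRange (p.1 + 1) (g.length : Int) 2).map
            (fun j => rowDiffB p.2 (PySem.List.pyGetD g j "")))) (r - k) []) k 0)).sum =
    ((List.range (min (r + 1) ((g.length : Int) - (r + 1))).toNat).map (fun (k : ℕ) =>
      rowDiffA (PySem.List.pyGetD g (r - (k : Int)) "")
               (PySem.List.pyGetD g (r + 1 + (k : Int)) ""))).sum := by
  have hd : (PySem.List.enumerate g).map (fun p =>
        (PySem.List.pyRange (p.1 + 1) (g.length : Int) 2).map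
          (fun j => rowDiffB p.2 (PySem.List.pyGetD g j "")))
      = (PySem.List.pyRange 0 (g.length : Int) 1).map (fun i =>
        (PySem.List.pyRange (i + 1) (g.length : Int) 2).map
          (fun j => rowDiffB (PySem.List.pyGetD g i "") (PySem.List.pyGetD g j ""))) := by
    rw [PySem.List.enumerate_eq_map_pyRange g "", List.map_map]
    rfl
  have hm : (g.length : Int) - 1 - r = (g.length : Int) - (r + 1) := by ring
  rw [hm, PySem.List.pyRange_one 0 (min (r + 1) ((g.length : Int) - (r + 1))), List.map_map]
  have hz : min (r + 1) ((g.length : Int) - (r + 1)) - 0 = min (r + 1) ((g.length : Int) - (r + 1)) := by ring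
  rw [hz]
  refine congrArg List.sum (List.map_congr_left ?_)
  intro k hk
  simp only [Function.comp_apply, zero_add]
  have hk' : (k : Int) < min (r + 1) ((g.length : Int) - (r + 1)) := by
    have := List.mem_range.mp hk; omega
  have hi1 : 0 ≤ r - (k : Int) := by omega
  have hi2 : r - (k : Int) < (g.length : Int) := by omega
  rw [hd, PySem.List.pyGetD_map_pyRange_of_nonneg _ (g.length : Int) (r - (k : Int)) [] hi1 hi2]
  rw [PySem.List.pyRange_of_pos (r - (k : Int) + 1) (g.length : Int) (by norm_num)]
  rw [if_pos (by omega : r - (k : Int) + 1 < (g.length : Int))]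
  rw [List.map_map, PySem.List.pyGetD_natCast]
  rw [PySem.List.getD_map_range _ _ _ _ (by omega)]
  simp only [Function.comp_apply]
  have harg : r - (k : Int) + 1 + 2 * (k : Int) = r + 1 + (k : Int) := by ring
  rw [harg]
  rfl

-- a fold over pairs splits into two independent folds
theorem foldl_pair (P Q : Int → Prop) [DecidablePred P] [DecidablePred Q] :
    ∀ (L : List Int) (a b : Int),
      L.foldl (fun (p : Int × Int) r => (if P r then r + 1 else p.1, if Q r then r + 1 else p.2)) (a, b)
        = (L.foldl (fun x r => if P r then r + 1 else x) a,
           L.foldl (fun x r => if Q r then r + 1 else x) b) := by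
  intro L
  induction L with
  | nil => intro a b; rfl
  | cons x xs ih => intro a b; simp [List.foldl_cons, ih]

-- overwrite-on-match fold = first match scanning from the back
theorem foldl_last (P : Int → Prop) [DecidablePred P] :
    ∀ (L : List Int) (a : Int),
      L.foldl (fun x r => if P r then r + 1 else x) a
        = ((L.reverse.find? (fun r => decide (P r))).map (· + 1)).getD a := by
  intro L
  induction L with
  | nil => intro a; rfl
  | cons x xs ih =>
    intro a
    simp only [List.foldl_cons, List.reverse_cons, List.find?_append, ih]
    cases hf : xs.reverse.find? (fun r => decide (P r)) with
    | some v => simp [hf]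
    | none => by_cases hp : P x <;> simp [hf, hp]

theorem int_beq_eq_decide (x y : Int) : (x == y) = decide (x = y) := by
  by_cases h : x = y <;> simp [h]

theorem find?_congr_mem {α : Type} (p q : α → Bool) :
    ∀ (L : List α), (∀ x ∈ L, p x = q x) → L.find? p = L.find? q := by
  intro L
  induction L with
  | nil => intro _; rfl
  | cons x xs ih =>
    intro h
    have hx := h x (by simp)
    simp only [List.find?_cons, hx, ih (fun y hy => h y (by simp [hy]))]

-- the memoised entry diffs[r] of B equals A's per-split difference
theorem diff_agree (g : List String) (r : Int) (h0 : 0 ≤ r)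
    (h1 : r < (g.length : Int) - 1) :
    PySem.List.pyGetD
      ((PySem.List.pyRange 0 ((g.length : Int) - 1) 1).map (fun r =>
        ((PySem.List.pyRange 0 (min (r + 1) ((g.length : Int) - 1 - r)) 1).map (fun k =>
          PySem.List.pyGetD (PySem.List.pyGetD
            ((PySem.List.enumerate g).map (fun p =>
              (PySem.List.pyRange (p.1 + 1) (g.length : Int) 2).map
                (fun j => rowDiffB p.2 (PySem.List.pyGetD g j "")))) (r - k) []) k 0)).sum))
      r 0
      = whileA g r (r + 1) 0 := by
  rw [PySem.List.pyGetD_map_pyRange_of_nonneg _ ((g.length : Int) - 1) r 0 h0 h1]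
  rw [splitDiff_eq g r h0 h1]
  rw [whileA_sum g (min (r + 1) ((g.length : Int) - (r + 1))).toNat r (r + 1) 0 rfl, zero_add]

-- ===== VERDICT (by name: the statement is the Claim_ definition above) =====
theorem findSymmetry_spec : Claim_equal_findSymmetry := by
  intro g _
  unfold Spec_findSymmetry findSymmetry findSymmetry_alt
  simp only []
  rw [foldl_pair (fun r => whileA g r (r + 1) 0 = 0) (fun r => whileA g r (r + 1) 0 = 1)]
  rw [foldl_last (fun r => whileA g r (r + 1) 0 = 0),
      foldl_last (fun r => whileA g r (r + 1) 0 = 1)]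
  have hmem : ∀ r ∈ (PySem.List.pyRange 0 ((g.length : Int) - 1) 1).reverse,
      0 ≤ r ∧ r < (g.length : Int) - 1 := by
    intro r hr
    have := PySem.List.mem_pyRange_one.mp (List.mem_reverse.mp hr)
    omega
  have hc0 := find?_congr_mem
      (fun r => decide (whileA g r (r + 1) 0 = 0))
      (fun r => PySem.List.pyGetD
        ((PySem.List.pyRange 0 ((g.length : Int) - 1) 1).map (fun r =>
          ((PySem.List.pyRange 0 (min (r + 1) ((g.length : Int) - 1 - r)) 1).map (fun k =>
            PySem.List.pyGetD (PySem.List.pyGetD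
              ((PySem.List.enumerate g).map (fun p =>
                (PySem.List.pyRange (p.1 + 1) (g.length : Int) 2).map
                  (fun j => rowDiffB p.2 (PySem.List.pyGetD g j "")))) (r - k) []) k 0)).sum))
        r 0 == 0)
      (PySem.List.pyRange 0 ((g.length : Int) - 1) 1).reverse
      (by intro r hr
          obtain ⟨h0, h1⟩ := hmem r hr
          simp only [diff_agree g r h0 h1, int_beq_eq_decide])
  have hc1 := find?_congr_mem
      (fun r => decide (whileA g r (r + 1) 0 = 1))
      (fun r => PySem.List.pyGetD
        ((PySem.List.pyRange 0 ((g.length : Int) - 1) 1).map (fun r =>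
          ((PySem.List.pyRange 0 (min (r + 1) ((g.length : Int) - 1 - r)) 1).map (fun k =>
            PySem.List.pyGetD (PySem.List.pyGetD
              ((PySem.List.enumerate g).map (fun p =>
                (PySem.List.pyRange (p.1 + 1) (g.length : Int) 2).map
                  (fun j => rowDiffB p.2 (PySem.List.pyGetD g j "")))) (r - k) []) k 0)).sum))
        r 0 == 1)
      (PySem.List.pyRange 0 ((g.length : Int) - 1) 1).reverse
      (by intro r hr
          obtain ⟨h0, h1⟩ := hmem r hr
          simp only [diff_agree g r h0 h1, int_beq_eq_decide])
  rw [hc0, hc1]
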